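-- pv_equiv track=rewrite | github.com/ljyou001/Leetcode-Problems-in-Python | rq-amazon-find-encrypted-password.py | findEncryptedPassword
-- ===== SOURCE A (Python) =====
-- import collections
--
-- def findEncryptedPassword(password: str) -> str:
--   if len(password) < 2:
--     return password
--
--   res = [''] * len(password)
--   left = 0
--   right = len(password) - 1
--   password = collections.Counter(password)
--
--   for char in sorted(password.keys()):
--     num = password[char]
--     if num % 2 != 0:
--       res[len(res) // 2] = char
--       num -= 1
--     while num > 0 and left < right:
--       res[left] = char
--       res[right] = char
--       left += 1
--       right -= 1
--       num -= 2
--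
--   return ''.join(res)
-- ===== SOURCE B (Python) =====
-- import collections
--
-- def findEncryptedPassword(password: str) -> str:
--   count = collections.Counter(password)
--   half_parts = []
--   middle = ''
--   for char in sorted(count.keys()):
--     half_parts.append(char * (count[char] // 2))
--     if count[char] % 2 != 0:
--       middle = char
--   half = ''.join(half_parts)
--   return half + middle + half[::-1]
-- ===== Notes on version B (the rewrite author's own statement) =====
-- stated objective: simpler
-- what changed: replaces A's preallocated full-length array with shared left/right two-pointer placement and a middle-slot overwrite by a mirror-and-concatenate construction: accumulate half = char*(count//2) over the sorted distinct chars, remember the last odd-count char as middle, and return half + middle + half[::-1]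
import Mathlib
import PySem

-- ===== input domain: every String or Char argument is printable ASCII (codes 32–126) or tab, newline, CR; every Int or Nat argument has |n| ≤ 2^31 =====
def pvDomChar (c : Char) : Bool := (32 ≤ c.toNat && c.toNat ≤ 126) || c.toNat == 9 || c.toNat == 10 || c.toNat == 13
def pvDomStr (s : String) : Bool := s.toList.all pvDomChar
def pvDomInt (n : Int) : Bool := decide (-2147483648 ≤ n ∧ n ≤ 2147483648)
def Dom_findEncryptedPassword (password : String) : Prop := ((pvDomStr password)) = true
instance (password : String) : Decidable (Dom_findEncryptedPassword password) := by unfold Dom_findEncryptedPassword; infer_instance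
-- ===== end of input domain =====

-- B replaces A's preallocated output array with shared left/right two-pointer placement and a
-- middle-slot overwrite by a mirror-and-concatenate construction (half + middle + reversed half);
-- objective: simpler.

-- ===== PORT A =====
-- the while loop 'while num > 0 and left < right: res[left] = char; res[right] = char; …'
-- (left/right are non-negative in-range indices whenever a write happens, so pySetD is exact)
def pvPlacePairs (char : Char) (res : List String) (left right num : Int) :
    List String × Int × Int :=
  if num > 0 ∧ left < right then
    pvPlacePairs char
      (PySem.List.pySetD (PySem.List.pySetD res left (String.ofList [char])) right
        (String.ofList [char]))
      (left + 1) (right - 1) (num - 2)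
  else (res, left, right)
  termination_by num.toNat
  decreasing_by omega

-- the body of A's 'for char in sorted(password.keys())' loop (f is the Counter lookup)
def pvLoopBody (f : Char → Int) (st : List String × Int × Int) (char : Char) :
    List String × Int × Int :=
  let num := f char
  let st1 :=
    if PySem.Int.mod num 2 ≠ 0 then
      (PySem.List.pySetD st.1 (PySem.Int.floordiv (st.1.length : Int) 2)
        (String.ofList [char]), num - 1)
    else (st.1, num)
  pvPlacePairs char st1.1 st.2.1 st.2.2 st1.2

def findEncryptedPassword (password : String) : String :=
  if PySem.Str.len password < 2 then password
  else
    let res : List String := List.replicate password.toList.length ""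
    let left : Int := 0
    let right : Int := PySem.Str.len password - 1
    let counter := PySem.Dict.counter password.toList
    let final := (PySem.List.sorted counter.keys (fun x => x) false).foldl
      (pvLoopBody (fun c => counter.getD c 0)) (res, left, right)
    PySem.Str.join "" final.1

-- ===== PORT B =====
-- B's loop body: append char * (count[char] // 2) to the half parts, remember the last
-- odd-count char as the middle
def pvAltBody (f : Char → Int) (st : List String × String) (char : Char) :
    List String × String :=
  (st.1 ++ [String.ofList (PySem.List.pyRepeat [char] (PySem.Int.floordiv (f char) 2))],
   if PySem.Int.mod (f char) 2 ≠ 0 then String.ofList [char] else st.2)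

def findEncryptedPassword_alt (password : String) : String :=
  let count := PySem.Dict.counter password.toList
  let st := (PySem.List.sorted count.keys (fun x => x) false).foldl
    (pvAltBody (fun c => count.getD c 0)) ([], "")
  let half := PySem.Str.join "" st.1
  half ++ st.2 ++ ((PySem.Str.slice? half none none (-1)).getD half)

-- ===== PRECONDITION & SPEC =====
def Spec_findEncryptedPassword (password : String) (out : String) : Prop := out = findEncryptedPassword_alt password
instance (password : String) (out : String) : Decidable (Spec_findEncryptedPassword password out) := by unfold Spec_findEncryptedPassword; infer_instance

-- ===== CLAIM (what is proved, stated in full; the proofs are below) =====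
def Claim_equal_findEncryptedPassword : Prop := ∀ (password : String), Dom_findEncryptedPassword password → Spec_findEncryptedPassword password (findEncryptedPassword password)

-- ===== LEMMAS AND PROOFS =====

-- single-character cell of A's result array
def pvToS (c : Char) : String := String.ofList [c]

-- the shape of A's array during its loop: placed pairs, blank gap with the middle cell, mirror
def pvMkRes (h : List Char) (a : Nat) (m : List Char) (b : Nat) : List String :=
  h.map pvToS ++ (List.replicate a "" ++ m.map pvToS ++ List.replicate b "") ++
    (h.map pvToS).reverse

-- B's half and middle as pure functions of the processed keys
def pvBHalf (f : Char → Int) (ks : List Char) : List Char :=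
  ks.flatMap (fun c => List.replicate ((f c).toNat / 2) c)
def pvBMid (f : Char → Int) (m : List Char) (ks : List Char) : List Char :=
  ks.foldl (fun m c => if PySem.Int.mod (f c) 2 ≠ 0 then [c] else m) m

lemma pvSet_len {α : Type} (pre : List α) (y x : α) (rest : List α) :
    (pre ++ y :: rest).set pre.length x = pre ++ x :: rest := by
  induction pre with
  | nil => simp
  | cons z t ih => simp [ih]

lemma pvPlacePairs_spec (c : Char) (p : Nat) :
    ∀ (pre gap post : List String), post.length = pre.length → 2 * p ≤ gap.length →
    pvPlacePairs c (pre ++ gap ++ post) (pre.length : Int)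
      ((pre.length : Int) + (gap.length : Int) - 1) ((2 * p : Nat) : Int)
    = (pre ++ List.replicate p (pvToS c) ++ ((gap.drop p).take (gap.length - 2 * p)) ++
         List.replicate p (pvToS c) ++ post,
       (pre.length : Int) + (p : Int),
       (pre.length : Int) + (gap.length : Int) - 1 - (p : Int)) := by
  induction p with
  | zero =>
    intro pre gap post _ _
    rw [pvPlacePairs]
    simp
  | succ p ih =>
    intro pre gap post hlen hp
    obtain ⟨g0, rest, rfl⟩ : ∃ g0 rest, gap = g0 :: rest := by
      cases gap with
      | nil => simp at hp
      | cons a t => exact ⟨a, t, rfl⟩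
    have hrest : rest ≠ [] := by
      intro h; subst h; simp at hp; omega
    obtain ⟨d, l, rfl⟩ : ∃ d l, rest = d ++ [l] :=
      ⟨rest.dropLast, rest.getLast hrest, (List.dropLast_append_getLast hrest).symm⟩
    have hp' : 2 * p ≤ d.length := by
      simp only [List.length_cons, List.length_append, List.length_nil] at hp; omega
    have hcond : ((2 * (p + 1) : Nat) : Int) > 0 ∧
        (pre.length : Int) < (pre.length : Int) + ((g0 :: (d ++ [l])).length : Int) - 1 := by
      simp only [List.length_cons, List.length_append, List.length_nil]
      push_cast
      omega
    have e1 : PySem.List.pySetD (pre ++ (g0 :: (d ++ [l])) ++ post) (pre.length : Int)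
        (String.ofList [c]) = pre ++ (pvToS c :: (d ++ [l])) ++ post := by
      rw [PySem.List.pySetD_natCast]
      have h3 : pre ++ (g0 :: (d ++ [l])) ++ post = pre ++ g0 :: (d ++ [l] ++ post) := by simp
      rw [h3, pvSet_len]
      simp [pvToS]
    have e2 : PySem.List.pySetD (pre ++ (pvToS c :: (d ++ [l])) ++ post)
        ((pre.length : Int) + ((g0 :: (d ++ [l])).length : Int) - 1) (String.ofList [c])
        = (pre ++ [pvToS c]) ++ d ++ (pvToS c :: post) := by
      have hc : ((pre.length : Int) + ((g0 :: (d ++ [l])).length : Int) - 1)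
          = (((pre ++ pvToS c :: d).length : Nat) : Int) := by
        simp only [List.length_append, List.length_cons, List.length_nil]
        push_cast
        omega
      rw [hc, PySem.List.pySetD_natCast]
      have h4 : pre ++ (pvToS c :: (d ++ [l])) ++ post
          = (pre ++ pvToS c :: d) ++ (l :: post) := by simp
      rw [h4, pvSet_len]
      simp [pvToS]
    rw [pvPlacePairs, if_pos hcond, e1, e2]
    have a1 : (pre.length : Int) + 1 = (((pre ++ [pvToS c]).length : Nat) : Int) := by
      simp
    have a2 : (pre.length : Int) + ((g0 :: (d ++ [l])).length : Int) - 1 - 1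
        = (((pre ++ [pvToS c]).length : Nat) : Int) + ((d.length : Nat) : Int) - 1 := by
      simp only [List.length_append, List.length_cons, List.length_nil]
      push_cast
      omega
    have a3 : ((2 * (p + 1) : Nat) : Int) - 2 = ((2 * p : Nat) : Int) := by
      push_cast; ring
    rw [a1, a2, a3, ih (pre ++ [pvToS c]) d (pvToS c :: post) (by simp [hlen]) hp']
    have emid : (d.drop p).take (d.length - 2 * p)
        = ((g0 :: (d ++ [l])).drop (p + 1)).take ((g0 :: (d ++ [l])).length - 2 * (p + 1)) := by
      rw [List.drop_succ_cons,
          List.drop_append_of_le_length (by omega),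
          List.take_append_of_le_length (by
            simp only [List.length_drop, List.length_cons, List.length_append,
              List.length_nil]
            omega)]
      congr 1
      simp only [List.length_cons, List.length_append, List.length_nil]
      omega
    have hswap : ∀ (w : List String),
        List.replicate p (pvToS c) ++ (pvToS c :: w)
          = pvToS c :: (List.replicate p (pvToS c) ++ w) := by
      intro w
      rw [show pvToS c :: w = [pvToS c] ++ w from rfl, ← List.append_assoc,
          ← List.replicate_succ', List.replicate_succ]
      simp
    refine Prod.ext ?_ (Prod.ext ?_ ?_)
    · show (pre ++ [pvToS c]) ++ List.replicate p (pvToS c) ++ _ ++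
          List.replicate p (pvToS c) ++ (pvToS c :: post) = _
      rw [← emid]
      simp only [List.replicate_succ, List.append_assoc, List.singleton_append,
        List.cons_append, List.nil_append, hswap]
    · simp only [List.length_append, List.length_cons, List.length_nil]
      push_cast
      omega
    · simp only [List.length_append, List.length_cons, List.length_nil]
      push_cast
      omega

lemma pvPairs_mid (c x : Char) (p : Nat) (h : List Char) (a b n : Nat)
    (hn : 2 * h.length + a + 1 + b = n) (hpa : p ≤ a) (hpb : p ≤ b) :
    pvPlacePairs c (pvMkRes h a [x] b) ((h.length : Nat) : Int)
      ((n : Int) - 1 - ((h.length : Nat) : Int)) ((2 * p : Nat) : Int)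
    = (pvMkRes (h ++ List.replicate p c) (a - p) [x] (b - p),
       (((h ++ List.replicate p c).length : Nat) : Int),
       (n : Int) - 1 - (((h ++ List.replicate p c).length : Nat) : Int)) := by
  have hspec := pvPlacePairs_spec c p (h.map pvToS)
    (List.replicate a "" ++ [pvToS x] ++ List.replicate b "")
    ((h.map pvToS).reverse) (by simp) (by simp; omega)
  have harg1 : ((h.length : Nat) : Int) = ((h.map pvToS).length : Int) := by simp
  have harg2 : ((n : Int) - 1 - ((h.length : Nat) : Int))
      = ((h.map pvToS).length : Int) +
        ((List.replicate a "" ++ [pvToS x] ++ List.replicate b "").length : Int) - 1 := by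
    simp
    push_cast
    omega
  have hres : pvMkRes h a [x] b
      = h.map pvToS ++ (List.replicate a "" ++ [pvToS x] ++ List.replicate b "") ++
        (h.map pvToS).reverse := by
    simp [pvMkRes]
  rw [hres, harg2, harg1, hspec]
  have hgap : (((List.replicate a "" ++ [pvToS x] ++ List.replicate b "").drop p).take
        ((List.replicate a "" ++ [pvToS x] ++ List.replicate b "").length - 2 * p))
      = List.replicate (a - p) "" ++ [pvToS x] ++ List.replicate (b - p) "" := by
    rw [List.drop_append_of_le_length (by simp; omega),
        List.drop_append_of_le_length (by simp; omega)]
    rw [List.drop_replicate]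
    rw [List.take_append, List.take_append]
    simp [List.take_replicate]
    rw [show min (a + (b + 1) - 2 * p) (a - p) = a - p from by omega,
        show a + (b + 1) - 2 * p - (a - p) = b + 1 - p from by omega,
        show min (a + (b + 1) - 2 * p - (a - p + 1)) b = b - p from by omega,
        List.take_of_length_le (by simp; omega)]
    simp
  rw [hgap]
  refine Prod.ext ?_ (Prod.ext ?_ ?_)
  · simp [pvMkRes, List.map_append, List.map_replicate, List.reverse_append,
      List.reverse_replicate, List.append_assoc]
  · simp
  · simp
    push_cast
    omega

lemma pvMkRes_blank (h : List Char) (a b : Nat) :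
    pvMkRes h a [] b = pvMkRes h (a + b) [] 0 := by
  simp [pvMkRes, ← List.replicate_add]

lemma pvPairs_blank (c : Char) (p : Nat) (h : List Char) (g n : Nat)
    (hn : 2 * h.length + g = n) (hp : 2 * p ≤ g) :
    pvPlacePairs c (pvMkRes h g [] 0) ((h.length : Nat) : Int)
      ((n : Int) - 1 - ((h.length : Nat) : Int)) ((2 * p : Nat) : Int)
    = (pvMkRes (h ++ List.replicate p c) (g - 2 * p) [] 0,
       (((h ++ List.replicate p c).length : Nat) : Int),
       (n : Int) - 1 - (((h ++ List.replicate p c).length : Nat) : Int)) := by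
  have hspec := pvPlacePairs_spec c p (h.map pvToS) (List.replicate g "")
    ((h.map pvToS).reverse) (by simp) (by simp; omega)
  have harg2 : ((n : Int) - 1 - ((h.length : Nat) : Int))
      = ((h.map pvToS).length : Int) + ((List.replicate g "" : List String).length : Int) - 1 := by
    simp
    push_cast
    omega
  have harg1 : ((h.length : Nat) : Int) = ((h.map pvToS).length : Int) := by simp
  have hres : pvMkRes h g [] 0
      = h.map pvToS ++ (List.replicate g "") ++ (h.map pvToS).reverse := by
    simp [pvMkRes]
  rw [hres, harg2, harg1, hspec]
  have hgap : ((List.replicate g ("" : String)).drop p).take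
        ((List.replicate g ("" : String)).length - 2 * p)
      = List.replicate (g - 2 * p) "" := by
    rw [List.drop_replicate, List.take_replicate]
    congr 1
    simp
    omega
  rw [hgap]
  refine Prod.ext ?_ (Prod.ext ?_ ?_)
  · simp [pvMkRes, List.map_append, List.map_replicate, List.reverse_append,
      List.reverse_replicate, List.append_assoc]
  · simp
  · simp
    omega

lemma pvSetMid_mid (c x : Char) (h : List Char) (a b n : Nat)
    (ha : h.length + a = n / 2) :
    (pvMkRes h a [x] b).set (n / 2) (pvToS c) = pvMkRes h a [c] b := by
  have h1 : pvMkRes h a [x] b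
      = (h.map pvToS ++ List.replicate a "") ++ pvToS x ::
          (List.replicate b "" ++ (h.map pvToS).reverse) := by
    simp [pvMkRes]
  have h2 : pvMkRes h a [c] b
      = (h.map pvToS ++ List.replicate a "") ++ pvToS c ::
          (List.replicate b "" ++ (h.map pvToS).reverse) := by
    simp [pvMkRes]
  have h3 : n / 2 = (h.map pvToS ++ List.replicate a "").length := by
    simp
    omega
  rw [h1, h2, h3, pvSet_len]

lemma pvSetMid_blank (c : Char) (h : List Char) (g n : Nat)
    (hlow : h.length ≤ n / 2) (hhigh : n / 2 < h.length + g) :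
    (pvMkRes h g [] 0).set (n / 2) (pvToS c)
      = pvMkRes h (n / 2 - h.length) [c] (g - (n / 2 - h.length) - 1) := by
  have hq : g = (n / 2 - h.length) + (1 + (g - (n / 2 - h.length) - 1)) := by omega
  have h1 : pvMkRes h g [] 0
      = (h.map pvToS ++ List.replicate (n / 2 - h.length) "") ++ ("" : String) ::
          (List.replicate (g - (n / 2 - h.length) - 1) "" ++ (h.map pvToS).reverse) := by
    simp [pvMkRes]
    rw [hq, List.replicate_add, List.replicate_add]
    simp [List.append_assoc]
  have h2 : pvMkRes h (n / 2 - h.length) [c] (g - (n / 2 - h.length) - 1)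
      = (h.map pvToS ++ List.replicate (n / 2 - h.length) "") ++ pvToS c ::
          (List.replicate (g - (n / 2 - h.length) - 1) "" ++ (h.map pvToS).reverse) := by
    simp [pvMkRes]
  have h3 : n / 2 = (h.map pvToS ++ List.replicate (n / 2 - h.length) "").length := by
    simp
    omega
  have h4 := pvSet_len (h.map pvToS ++ List.replicate (n / 2 - h.length) "")
    ("" : String) (pvToS c)
    (List.replicate (g - (n / 2 - h.length) - 1) "" ++ (h.map pvToS).reverse)
  rw [← h3] at h4
  rw [h1, h2, h4]

lemma pvMkRes_length (h : List Char) (a : Nat) (m : List Char) (b : Nat) :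
    (pvMkRes h a m b).length = 2 * h.length + a + m.length + b := by
  simp [pvMkRes]
  omega

lemma pvLoopBody_spec (f : Char → Int) (n : Nat) (c : Char) (h : List Char) (a b : Nat)
    (m : List Char)
    (hk : 1 ≤ f c)
    (hgeom : 2 * h.length + a + m.length + b = n)
    (hmid : m = [] ∨ (m.length = 1 ∧ h.length + a = n / 2))
    (hnum : 2 * h.length + (f c).toNat + m.length ≤ n) :
    ∃ a' b',
      pvLoopBody f (pvMkRes h a m b, ((h.length : Nat) : Int),
          (n : Int) - 1 - ((h.length : Nat) : Int)) c
        = (pvMkRes (h ++ List.replicate ((f c).toNat / 2) c) a'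
             (if PySem.Int.mod (f c) 2 ≠ 0 then [c] else m) b',
           (((h ++ List.replicate ((f c).toNat / 2) c).length : Nat) : Int),
           (n : Int) - 1 - (((h ++ List.replicate ((f c).toNat / 2) c).length : Nat) : Int)) ∧
      2 * (h.length + (f c).toNat / 2) + a' +
        (if PySem.Int.mod (f c) 2 ≠ 0 then [c] else m).length + b' = n ∧
      ((if PySem.Int.mod (f c) 2 ≠ 0 then [c] else m) = [] ∨
        ((if PySem.Int.mod (f c) 2 ≠ 0 then [c] else m).length = 1 ∧
          h.length + (f c).toNat / 2 + a' = n / 2)) := by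
  set k := (f c).toNat with hkdef
  have hfc : f c = ((k : Nat) : Int) := by omega
  have hmod : PySem.Int.mod (f c) 2 = ((k % 2 : Nat) : Int) := by
    rw [hfc]; exact_mod_cast PySem.Int.mod_natCast k 2
  have hk1 : 1 ≤ k := by omega
  by_cases hodd : k % 2 = 1
  · -- odd count: middle write then (k-1)/2 = k/2 pairs
    have hcond : PySem.Int.mod (f c) 2 ≠ 0 := by rw [hmod]; simp [hodd]
    have hifm : (if PySem.Int.mod (f c) 2 ≠ 0 then [c] else m) = [c] := if_pos hcond
    have hlenres : ((pvMkRes h a m b).length : Int) = (n : Int) := by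
      rw [pvMkRes_length]; push_cast; omega
    have hfd : PySem.Int.floordiv ((pvMkRes h a m b).length : Int) 2
        = ((n / 2 : Nat) : Int) := by
      rw [hlenres]; exact_mod_cast PySem.Int.floordiv_natCast n 2
    have hbody : pvLoopBody f (pvMkRes h a m b, ((h.length : Nat) : Int),
          (n : Int) - 1 - ((h.length : Nat) : Int)) c
        = pvPlacePairs c ((pvMkRes h a m b).set (n / 2) (pvToS c))
            ((h.length : Nat) : Int) ((n : Int) - 1 - ((h.length : Nat) : Int)) (f c - 1) := by
      simp only [pvLoopBody, if_pos hcond, hfd, PySem.List.pySetD_natCast]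
      rfl
    have hnum2 : ((f c) - 1) = ((2 * (k / 2) : Nat) : Int) := by
      rw [hfc]; push_cast; omega
    rcases hmid with hm | ⟨hm1, hm2⟩
    · -- no middle yet: blank gap
      subst hm
      simp only [List.length_nil, Nat.add_zero] at hgeom hnum
      refine ⟨n / 2 - h.length - k / 2, (a + b) - (n / 2 - h.length) - 1 - k / 2, ?_, ?_, ?_⟩
      · rw [hbody, pvMkRes_blank, pvSetMid_blank c h (a + b) n (by omega) (by omega),
            hnum2, pvPairs_mid c c (k / 2) h (n / 2 - h.length)
              ((a + b) - (n / 2 - h.length) - 1) n (by omega) (by omega) (by omega), hifm]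
      · simp only [hifm, List.length_cons, List.length_nil]
        omega
      · refine Or.inr ⟨by rw [hifm]; rfl, by omega⟩
    · -- a middle cell is already present: overwrite it
      obtain ⟨x, rfl⟩ := List.length_eq_one_iff.mp hm1
      simp only [List.length_cons, List.length_nil] at hgeom hnum
      refine ⟨a - k / 2, b - k / 2, ?_, ?_, ?_⟩
      · rw [hbody, pvSetMid_mid c x h a b n hm2, hnum2,
            pvPairs_mid c c (k / 2) h a b n (by omega) (by omega) (by omega), hifm]
      · simp only [hifm, List.length_cons, List.length_nil]
        omega
      · refine Or.inr ⟨by rw [hifm]; rfl, by omega⟩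
  · -- even count: no middle write, k/2 pairs
    have hcond : ¬ PySem.Int.mod (f c) 2 ≠ 0 := by rw [hmod]; simp; omega
    have hifm : (if PySem.Int.mod (f c) 2 ≠ 0 then [c] else m) = m := if_neg hcond
    have hbody : pvLoopBody f (pvMkRes h a m b, ((h.length : Nat) : Int),
          (n : Int) - 1 - ((h.length : Nat) : Int)) c
        = pvPlacePairs c (pvMkRes h a m b)
            ((h.length : Nat) : Int) ((n : Int) - 1 - ((h.length : Nat) : Int)) (f c) := by
      simp only [pvLoopBody, if_neg hcond]
    have hnum2 : (f c) = ((2 * (k / 2) : Nat) : Int) := by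
      rw [hfc]; push_cast; omega
    rcases hmid with hm | ⟨hm1, hm2⟩
    · subst hm
      simp only [List.length_nil, Nat.add_zero] at hgeom hnum
      refine ⟨(a + b) - 2 * (k / 2), 0, ?_, ?_, ?_⟩
      · rw [hbody, pvMkRes_blank, hifm, hnum2,
            pvPairs_blank c (k / 2) h (a + b) n (by omega) (by omega)]
      · simp only [hifm, List.length_nil]
        omega
      · exact Or.inl hifm
    · obtain ⟨x, rfl⟩ := List.length_eq_one_iff.mp hm1
      simp only [List.length_cons, List.length_nil] at hgeom hnum
      refine ⟨a - k / 2, b - k / 2, ?_, ?_, ?_⟩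
      · rw [hbody, hifm, hnum2,
            pvPairs_mid c x (k / 2) h a b n (by omega) (by omega) (by omega)]
      · simp only [hifm, List.length_cons, List.length_nil]
        omega
      · refine Or.inr ⟨by rw [hifm]; rfl, by omega⟩

lemma pvFold_spec (f : Char → Int) (n : Nat) :
    ∀ (ks h : List Char) (a b : Nat) (m : List Char),
    (∀ c ∈ ks, 1 ≤ f c) →
    2 * h.length + a + m.length + b = n →
    (m = [] ∨ (m.length = 1 ∧ h.length + a = n / 2)) →
    2 * h.length + (ks.map (fun c => (f c).toNat)).sum + m.length ≤ n →
    ∃ a' b',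
      ks.foldl (pvLoopBody f)
          (pvMkRes h a m b, ((h.length : Nat) : Int), (n : Int) - 1 - ((h.length : Nat) : Int))
        = (pvMkRes (h ++ pvBHalf f ks) a' (pvBMid f m ks) b',
           (((h ++ pvBHalf f ks).length : Nat) : Int),
           (n : Int) - 1 - (((h ++ pvBHalf f ks).length : Nat) : Int)) := by
  intro ks
  induction ks with
  | nil =>
    intro h a b m _ hgeom hmid hnum
    exact ⟨a, b, by simp [pvBHalf, pvBMid]⟩
  | cons c t ih =>
    intro h a b m hpos hgeom hmid hnum
    have hk : 1 ≤ f c := hpos c (List.mem_cons_self ..)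
    simp only [List.map_cons, List.sum_cons] at hnum
    obtain ⟨a1, b1, heq, hgeom1, hmid1⟩ :=
      pvLoopBody_spec f n c h a b m hk hgeom hmid (by omega)
    rw [List.foldl_cons, heq]
    have hlen' : (h ++ List.replicate ((f c).toNat / 2) c).length
        = h.length + (f c).toNat / 2 := by simp
    obtain ⟨a2, b2, heq2⟩ := ih (h ++ List.replicate ((f c).toNat / 2) c) a1 b1
      (if PySem.Int.mod (f c) 2 ≠ 0 then [c] else m)
      (fun x hx => hpos x (List.mem_cons_of_mem _ hx))
      (by rw [hlen']; omega)
      (by rw [hlen']; exact hmid1)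
      (by
        rw [hlen']
        have hmodc : PySem.Int.mod (f c) 2 = (((f c).toNat % 2 : Nat) : Int) := by
          rw [show f c = ((f c).toNat : Int) from by omega]
          exact_mod_cast PySem.Int.mod_natCast (f c).toNat 2
        by_cases hodd : PySem.Int.mod (f c) 2 ≠ 0
        · rw [if_pos hodd]
          simp only [List.length_cons, List.length_nil]
          have hpar : (f c).toNat % 2 = 1 := by rw [hmodc] at hodd; omega
          omega
        · rw [if_neg hodd]
          omega)
    refine ⟨a2, b2, ?_⟩
    rw [heq2]
    have hhalf : pvBHalf f (c :: t)
        = List.replicate ((f c).toNat / 2) c ++ pvBHalf f t := by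
      simp [pvBHalf]
    have hmid2 : pvBMid f m (c :: t)
        = pvBMid f (if PySem.Int.mod (f c) 2 ≠ 0 then [c] else m) t := rfl
    rw [hhalf, hmid2, ← List.append_assoc]

lemma pvBMid_start (f : Char → Int) (ks : List Char) :
    ∀ m, pvBMid f m ks = if pvBMid f [] ks = [] then m else pvBMid f [] ks := by
  induction ks with
  | nil => intro m; simp [pvBMid]
  | cons c t ih =>
    intro m
    have e1 : pvBMid f m (c :: t)
        = pvBMid f (if PySem.Int.mod (f c) 2 ≠ 0 then [c] else m) t := rfl
    have e0 : pvBMid f [] (c :: t)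
        = pvBMid f (if PySem.Int.mod (f c) 2 ≠ 0 then [c] else []) t := rfl
    rw [e1, e0]
    by_cases hodd : PySem.Int.mod (f c) 2 ≠ 0
    · simp only [if_pos hodd]
      rw [ih [c]]
      by_cases h : pvBMid f [] t = [] <;> simp [h]
    · simp only [if_neg hodd]
      exact ih m

lemma pvAltFold (f : Char → Int) :
    ∀ (ks : List Char), (∀ c ∈ ks, 0 ≤ f c) →
    ∀ (hp : List String) (mid : String),
    ks.foldl (pvAltBody f) (hp, mid)
      = (hp ++ ks.map (fun c => String.ofList (List.replicate ((f c).toNat / 2) c)),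
         match pvBMid f [] ks with
         | [] => mid
         | m => String.ofList m) := by
  intro ks
  induction ks with
  | nil => intro _ hp mid; simp [pvBMid]
  | cons c t ih =>
    intro hpos hp mid
    have hc : 0 ≤ f c := hpos c (List.mem_cons_self ..)
    rw [List.foldl_cons]
    have hbody : pvAltBody f (hp, mid) c =
        (hp ++ [String.ofList (List.replicate ((f c).toNat / 2) c)],
         if PySem.Int.mod (f c) 2 ≠ 0 then String.ofList [c] else mid) := by
      have hfd : PySem.Int.floordiv (f c) 2 = (((f c).toNat / 2 : Nat) : Int) := by
        have h2 := PySem.Int.floordiv_natCast (f c).toNat 2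
        rw [show f c = ((f c).toNat : Int) from by omega]
        exact_mod_cast h2
      simp only [pvAltBody, PySem.List.pyRepeat_singleton, hfd, Int.toNat_natCast]
    rw [hbody, ih (fun x hx => hpos x (List.mem_cons_of_mem _ hx))]
    have e0 : pvBMid f [] (c :: t)
        = pvBMid f (if PySem.Int.mod (f c) 2 ≠ 0 then [c] else []) t := rfl
    simp only [Prod.mk.injEq]
    refine ⟨by simp, ?_⟩
    rw [e0]
    by_cases hodd : PySem.Int.mod (f c) 2 ≠ 0
    · simp only [if_pos hodd]
      rcases hB : pvBMid f [] t with _ | ⟨x, xs⟩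
      · rw [pvBMid_start f t [c], hB]; simp
      · rw [pvBMid_start f t [c], hB]; simp
    · simp only [if_neg hodd]

lemma pvJoin_toList (parts : List String) :
    (PySem.Str.join "" parts).toList = (parts.map String.toList).flatten := by
  rw [PySem.Str.toList_join]
  induction parts with
  | nil => simp [PySem.Chars.join_nil]
  | cons p rest ih =>
    cases rest with
    | nil => simp [PySem.Chars.join_singleton]
    | cons q r =>
      simp only [List.map_cons] at ih ⊢
      rw [PySem.Chars.join_cons_cons]
      simp only [List.flatten_cons] at ih ⊢
      rw [ih]
      simp

lemma pvSingles (l : List Char) : ((l.map pvToS).map String.toList).flatten = l := by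
  induction l with
  | nil => simp
  | cons c t ih =>
    simp only [List.map_cons, List.flatten_cons]
    rw [ih]
    simp [pvToS]

lemma pvBlanks (a : Nat) :
    ((List.replicate a ("" : String)).map String.toList).flatten = ([] : List Char) := by
  induction a with
  | zero => simp
  | succ a ih => simp [List.replicate_succ]

lemma pvJoin_mkRes (h : List Char) (a : Nat) (m : List Char) (b : Nat) :
    (PySem.Str.join "" (pvMkRes h a m b)).toList = h ++ m ++ h.reverse := by
  rw [pvJoin_toList]
  simp only [pvMkRes, List.map_append, List.flatten_append, pvSingles, pvBlanks,
    ← List.map_reverse]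
  simp

lemma pvSum_counts (s : List Char) :
    (((PySem.List.sorted (PySem.Set.ofList s) (fun x => x) false).map
        (fun c => s.count c)).sum) = s.length := by
  have hperm1 : (PySem.List.sorted (PySem.Set.ofList s) (fun x => x) false).Perm
      (PySem.Set.ofList s) := PySem.List.sorted_perm _ _ _
  have hnd : (PySem.Set.ofList s).Nodup := PySem.Set.nodup_ofList s
  have hperm2 : (PySem.Set.ofList s).Perm s.dedup := by
    apply List.perm_of_nodup_nodup_toFinset_eq hnd (List.nodup_dedup s)
    ext x
    simp [PySem.Set.mem_ofList]
  have := (hperm1.trans hperm2).map (fun c => s.count c)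
  rw [this.sum_eq]
  simpa using List.sum_map_count_dedup_eq_length s


-- B's value, described through pvBHalf/pvBMid
lemma pvAlt_toList (password : String) :
    (findEncryptedPassword_alt password).toList
      = pvBHalf (fun c => ((password.toList.count c : Nat) : Int))
          (PySem.List.sorted (PySem.Set.ofList password.toList) (fun x => x) false)
        ++ pvBMid (fun c => ((password.toList.count c : Nat) : Int)) []
             (PySem.List.sorted (PySem.Set.ofList password.toList) (fun x => x) false)
        ++ (pvBHalf (fun c => ((password.toList.count c : Nat) : Int))
             (PySem.List.sorted (PySem.Set.ofList password.toList) (fun x => x) false)).reverse := by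
  have hF : (fun c => (PySem.Dict.counter password.toList).getD c 0)
      = (fun c => ((password.toList.count c : Nat) : Int)) := by
    funext c; exact PySem.Dict.getD_counter password.toList c
  simp only [findEncryptedPassword_alt, PySem.Dict.keys_counter, hF]
  rw [pvAltFold _ _ (fun c _ => by positivity) [] ""]
  simp only [List.nil_append]
  have hhalf : (PySem.Str.join ""
      (List.map (fun c => String.ofList
          (List.replicate (((password.toList.count c : Nat) : Int).toNat / 2) c))
        (PySem.List.sorted (PySem.Set.ofList password.toList) (fun x => x) false))).toList
      = pvBHalf (fun c => ((password.toList.count c : Nat) : Int))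
          (PySem.List.sorted (PySem.Set.ofList password.toList) (fun x => x) false) := by
    rw [pvJoin_toList, List.map_map, pvBHalf, List.flatMap_def]
    congr 1
    apply List.map_congr_left
    intro c _
    simp
  rw [String.toList_append, String.toList_append, PySem.Str.slice?_none_none_neg_one]
  simp only [Option.getD_some, String.toList_ofList]
  rw [hhalf]
  rcases hM : pvBMid (fun c => ((password.toList.count c : Nat) : Int)) []
      (PySem.List.sorted (PySem.Set.ofList password.toList) (fun x => x) false) with _ | ⟨x, xs⟩
  · simp
  · simp

-- the two programs compute the same string, for every input
lemma pvMain (password : String) :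
    findEncryptedPassword password = findEncryptedPassword_alt password := by
  have hinj : ∀ t : String, (findEncryptedPassword password).toList = t.toList →
      findEncryptedPassword password = t := by
    intro t h
    have h2 := congrArg String.ofList h
    rwa [String.ofList_toList, String.ofList_toList] at h2
  apply hinj
  rw [pvAlt_toList]
  by_cases hn : password.toList.length < 2
  · -- the len(password) < 2 short-circuit: A returns the input; B computes the same value
    have hA : findEncryptedPassword password = password := by
      simp only [findEncryptedPassword]
      rw [if_pos (by simp only [PySem.Str.len_eq]; exact_mod_cast hn)]
    rw [hA]
    rcases hsl : password.toList with _ | ⟨c, t⟩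
    · simp [pvBHalf, pvBMid]
    · have ht : t = [] := by
        cases t with
        | nil => rfl
        | cons d u => rw [hsl] at hn; simp at hn
      subst ht
      have hset : PySem.Set.ofList [c] = [c] :=
        PySem.Set.ofList_eq_self_of_nodup [c] (List.nodup_singleton c)
      have hsort : PySem.List.sorted [c] (fun x : Char => x) = [c] :=
        PySem.List.sorted_eq_self_of_pairwise [c] (fun x : Char => x) (by simp)
      rw [hset, hsort]
      simp [pvBHalf, pvBMid, PySem.Int.mod]
  · -- main case: len(password) ≥ 2
    have hge : 2 ≤ password.toList.length := by omega
    have hF : (fun c => (PySem.Dict.counter password.toList).getD c 0)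
        = (fun c => ((password.toList.count c : Nat) : Int)) := by
      funext c; exact PySem.Dict.getD_counter password.toList c
    simp only [findEncryptedPassword, PySem.Dict.keys_counter, hF]
    rw [if_neg (by simp only [PySem.Str.len_eq]; push_cast; omega)]
    have hstart : (List.replicate password.toList.length ("" : String), (0 : Int),
          PySem.Str.len password - 1)
        = (pvMkRes [] password.toList.length [] 0, ((([] : List Char).length : Nat) : Int),
           ((password.toList.length : Nat) : Int) - 1 - ((([] : List Char).length : Nat) : Int)) := by
      refine Prod.ext ?_ (Prod.ext ?_ ?_)
      · simp [pvMkRes]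
      · simp
      · simp [PySem.Str.len_eq]
    rw [hstart]
    have hpos : ∀ c ∈ PySem.List.sorted (PySem.Set.ofList password.toList) (fun x => x) false,
        1 ≤ ((password.toList.count c : Nat) : Int) := by
      intro c hc
      rw [PySem.List.mem_sorted, PySem.Set.mem_ofList] at hc
      have := List.count_pos_iff.mpr hc
      omega
    have hsum : ((PySem.List.sorted (PySem.Set.ofList password.toList) (fun x => x) false).map
        (fun c => (((password.toList.count c : Nat) : Int)).toNat)).sum
        = password.toList.length := by
      have hcongr : ((PySem.List.sorted (PySem.Set.ofList password.toList) (fun x => x) false).map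
          (fun c => (((password.toList.count c : Nat) : Int)).toNat))
          = ((PySem.List.sorted (PySem.Set.ofList password.toList) (fun x => x) false).map
            (fun c => password.toList.count c)) := by
        apply List.map_congr_left
        intro c _
        simp
      rw [hcongr]
      exact pvSum_counts password.toList
    obtain ⟨a', b', heq⟩ := pvFold_spec (fun c => ((password.toList.count c : Nat) : Int))
      password.toList.length
      (PySem.List.sorted (PySem.Set.ofList password.toList) (fun x => x) false)
      [] password.toList.length 0 [] hpos (by simp) (Or.inl rfl)
      (by simp only [List.length_nil]; rw [hsum]; omega)
    rw [heq]
    show (PySem.Str.join "" (pvMkRes _ a' _ b')).toList = _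
    rw [pvJoin_mkRes]
    simp only [List.nil_append]

-- ===== VERDICT (by name: the statement is the Claim_ definition above) =====
theorem findEncryptedPassword_spec : Claim_equal_findEncryptedPassword := by
  intro password _
  unfold Spec_findEncryptedPassword
  exact pvMain password
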